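-- pv_equiv track=rewrite | github.com/tomdh-git/BMI-Calculator | PythonProblems.py | put_together
-- ===== SOURCE A (Python) =====
-- def put_together(inp: str) -> str:
--     """sorts a string by the characters in it
--
--     Args:
--         inp (str): inputted string that you want
--         to sort
--
--     Returns:
--         str: returns the sorted string
--     """
--     if inp == '':
--         return ''
--     char_count = {}
--     for char in inp: #for each letter in inp
--         if char in char_count:
--             char_count[char] += 1
--         else:
--             char_count[char] = 1
--     res = []
--     for char in inp: #acda
--         if char in char_count: #if a in charcount
--             res.append(char * char_count[char])
--             del char_count[char] #delete from dictionary
--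
--     # Join the list into a string
--     return ''.join(res)
-- ===== SOURCE B (Python) =====
-- def put_together(inp: str) -> str:
--     """Group characters by first-occurrence order, each repeated as often as it occurs.
--
--     Recursive partition: peel off the first character, drop all of its copies
--     from the rest, emit its run (length difference), and recurse on the remainder.
--     """
--     if inp == '':
--         return ''
--     c = inp[0]
--     rest = ''.join(ch for ch in inp[1:] if ch != c)
--     return c * (len(inp) - len(rest)) + put_together(rest)
-- ===== Notes on version B (the rewrite author's own statement) =====
-- stated objective: alternative
-- what changed: Replaces A's dict counting plus rescan-with-deletion by a recursive partition: peel the first character, filter all its copies out of the tail, emit its run via a length difference, and recurse on the remainder - no count table or dictionary at all.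
import Mathlib
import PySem

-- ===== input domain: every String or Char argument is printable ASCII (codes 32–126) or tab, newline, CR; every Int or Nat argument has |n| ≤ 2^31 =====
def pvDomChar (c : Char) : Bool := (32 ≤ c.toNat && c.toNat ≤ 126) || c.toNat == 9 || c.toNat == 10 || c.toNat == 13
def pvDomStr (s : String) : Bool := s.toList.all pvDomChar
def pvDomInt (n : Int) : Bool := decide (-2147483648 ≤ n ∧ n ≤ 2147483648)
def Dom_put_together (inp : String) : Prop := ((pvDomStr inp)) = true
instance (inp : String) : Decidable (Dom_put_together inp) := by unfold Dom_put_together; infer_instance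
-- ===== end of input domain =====

-- B replaces A's dict-count-then-rescan by a recursive partition (peel the first char,
-- filter its copies from the tail, emit its run by length difference, recurse); objective: alternative.

-- ===== PORT A =====
-- first loop: build char_count (if char in char_count: += 1 else: = 1)
def pvBuildA (xs : List Char) : PySem.Dict Char Int :=
  xs.foldl (fun d c => if d.contains c then d.modify c 0 (· + 1) else d.insert c 1)
    PySem.Dict.empty

-- second loop: for char in inp: if char in char_count: append char*count; del char_count[char]
-- (char * n  →  List.replicate n.toNat char: exact, Python gives '' for n ≤ 0)
def pvLoopA : List Char → PySem.Dict Char Int → List (List Char) → List (List Char)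
  | [], _, res => res
  | c :: cs, d, res =>
    if d.contains c then
      pvLoopA cs (d.erase c) (res ++ [List.replicate (d.getD c 0).toNat c])
    else
      pvLoopA cs d res

def put_together (inp : String) : String :=
  if inp = "" then ""
  else String.ofList ((pvLoopA inp.toList (pvBuildA inp.toList) []).flatten)  -- ''.join(res)

-- ===== PORT B =====
-- recursive partition on the character list:
-- if inp == '': return ''; c = inp[0]; rest = tail with all c removed;
-- c * (len(inp) - len(rest)) + put_together(rest)
-- rest = ''.join(ch for ch in inp[1:] if ch != c)
def pvDrop (c : Char) (cs : List Char) : List Char := cs.filter (fun ch => ch ≠ c)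

theorem pvDrop_len_le (c : Char) (cs : List Char) : (pvDrop c cs).length ≤ cs.length :=
  List.length_filter_le _ _

def pvAltGo : List Char → List Char
  | [] => []
  | c :: cs =>
    List.replicate ((c :: cs).length - (pvDrop c cs).length) c ++ pvAltGo (pvDrop c cs)
termination_by l => l.length
decreasing_by
  simp only [List.length_cons]
  exact Nat.lt_succ_of_le (pvDrop_len_le c cs)

def put_together_alt (inp : String) : String :=
  if inp = "" then "" else String.ofList (pvAltGo inp.toList)

-- ===== PRECONDITION & SPEC =====
def Spec_put_together (inp : String) (out : String) : Prop := out = put_together_alt inp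
instance (inp : String) (out : String) : Decidable (Spec_put_together inp out) := by unfold Spec_put_together; infer_instance

-- ===== CLAIM (what is proved, stated in full; the proofs are below) =====
def Claim_equal_put_together : Prop := ∀ (inp : String), Dom_put_together inp → Spec_put_together inp (put_together inp)

-- ===== LEMMAS AND PROOFS =====

-- A's first loop is Counter(inp)
theorem pvBuildA_go (xs : List Char) (d : PySem.Dict Char Int) :
    xs.foldl (fun d c => if d.contains c then d.modify c 0 (· + 1) else d.insert c 1) d
      = xs.foldl (fun d c => d.modify c 0 (· + 1)) d := by
  induction xs generalizing d with
  | nil => rfl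
  | cons c cs ih =>
    simp only [List.foldl_cons]
    rw [ih]
    congr 1
    by_cases h : d.contains c = true
    · simp [h]
    · simp only [Bool.not_eq_true] at h
      simp [h, PySem.Dict.modify, PySem.Dict.getD_of_not_contains d 0 h]

theorem pvBuildA_eq (xs : List Char) : pvBuildA xs = PySem.Dict.counter xs := by
  rw [pvBuildA, pvBuildA_go]; rfl

-- erase facts (erase filters the item list)
theorem pv_contains_erase (d : PySem.Dict Char Int) (c c' : Char) :
    (d.erase c).contains c' = (decide (c' ≠ c) && d.contains c') := by
  obtain ⟨l⟩ := d
  induction l with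
  | nil => simp [PySem.Dict.erase, PySem.Dict.contains]
  | cons p ps ih =>
    simp only [PySem.Dict.erase, PySem.Dict.contains, List.filter_cons, List.any_cons] at ih ⊢
    by_cases hp : p.1 = c
    · have h1 : (!(p.1 == c)) = false := by simp [hp]
      rw [h1]
      simp only [Bool.false_eq_true, if_false]
      rw [ih]
      by_cases hc : c' = c
      · simp [hc]
      · have h2 : (p.1 == c') = false := by simp [hp]; exact fun hh => hc hh.symm
        simp [h2, hc]
    · have h1 : (!(p.1 == c)) = true := by simp [hp]
      rw [h1]
      simp only [if_true, List.any_cons]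
      rw [ih]
      by_cases hpc : p.1 = c'
      · have hc : c' ≠ c := fun heq => hp (hpc.trans heq)
        simp [hpc, hc]
      · have h2 : (p.1 == c') = false := by simp [hpc]
        simp [h2]

theorem pv_getD_erase_of_ne (d : PySem.Dict Char Int) (c c' : Char) (h : c' ≠ c) :
    (d.erase c).getD c' 0 = d.getD c' 0 := by
  obtain ⟨l⟩ := d
  induction l with
  | nil => rfl
  | cons p ps ih =>
    simp only [PySem.Dict.erase, PySem.Dict.getD, PySem.Dict.get?, List.filter_cons]
    by_cases hp : p.1 = c
    · have h1 : (!(p.1 == c)) = false := by simp [hp]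
      rw [h1]
      simp only [Bool.false_eq_true, if_false]
      rw [List.find?_cons_of_neg (by simp [hp]; exact fun hh => h hh.symm)]
      simpa [PySem.Dict.erase, PySem.Dict.getD, PySem.Dict.get?] using ih
    · have h1 : (!(p.1 == c)) = true := by simp [hp]
      rw [h1]
      simp only [if_true]
      by_cases hpc : p.1 = c'
      · rw [List.find?_cons_of_pos (by simp [hpc]), List.find?_cons_of_pos (by simp [hpc])]
      · rw [List.find?_cons_of_neg (by simp [hpc]), List.find?_cons_of_neg (by simp [hpc])]
        simpa [PySem.Dict.erase, PySem.Dict.getD, PySem.Dict.get?] using ih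

-- characterisation of A's second loop for an arbitrary dict
theorem pvLoopA_eq (xs : List Char) (d : PySem.Dict Char Int) (res : List (List Char)) :
    pvLoopA xs d res
      = res ++ ((PySem.Set.ofList xs).filter (fun c => d.contains c)).map
          (fun c => List.replicate (d.getD c 0).toNat c) := by
  induction xs generalizing d res with
  | nil => simp [pvLoopA, PySem.Set.ofList]
  | cons c cs ih =>
    rw [PySem.Set.ofList_cons]
    by_cases h : d.contains c = true
    · rw [pvLoopA, if_pos h, ih]
      simp only [List.filter_cons, h, if_pos, List.map_cons, List.append_assoc,
        List.singleton_append]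
      congr 1
      have hfil : (PySem.Set.ofList cs).filter (fun x => (d.erase c).contains x)
          = ((PySem.Set.ofList cs).discard c).filter (fun x => d.contains x) := by
        simp only [PySem.Set.discard, List.filter_filter]
        apply List.filter_congr
        intro x _
        rw [pv_contains_erase]
        by_cases hx : x = c <;> simp [hx]
      rw [hfil]
      congr 1
      apply List.map_congr_left
      intro x hx
      have hxne : x ≠ c := by
        simp only [List.mem_filter, PySem.Set.discard, List.mem_filter] at hx
        simpa using hx.1.2
      rw [pv_getD_erase_of_ne d c x hxne]
    · simp only [Bool.not_eq_true] at h
      rw [pvLoopA, if_neg (by simp [h]), ih]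
      congr 2
      simp only [List.filter_cons, h, PySem.Set.discard, List.filter_filter]
      apply List.filter_congr
      intro x _
      by_cases hx : x = c <;> simp [hx, h]

-- A's whole computation, as runs of counts over the deduplicated characters
theorem pvA_char (l : List Char) :
    (pvLoopA l (pvBuildA l) []).flatten
      = (PySem.Set.ofList l).flatMap (fun c => List.replicate (l.count c) c) := by
  rw [pvBuildA_eq, pvLoopA_eq]
  have hfil : (PySem.Set.ofList l).filter (fun c => (PySem.Dict.counter l).contains c)
      = PySem.Set.ofList l := by
    apply List.filter_eq_self.mpr
    intro x hx
    rw [PySem.Dict.contains_counter]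
    simpa using ((PySem.Set.mem_ofList _ _).mp hx)
  rw [hfil, List.flatMap_def]
  simp only [List.nil_append]
  congr 1
  apply List.map_congr_left
  intro x _
  rw [PySem.Dict.getD_counter]
  simp

-- dedup commutes with filter
theorem pv_ofList_filter (p : Char → Bool) (l : List Char) :
    PySem.Set.ofList (l.filter p) = (PySem.Set.ofList l).filter p := by
  induction l with
  | nil => rfl
  | cons c cs ih =>
    rw [PySem.Set.ofList_cons, List.filter_cons]
    by_cases hp : p c = true
    · rw [hp, if_pos rfl, PySem.Set.ofList_cons, ih]
      simp only [PySem.Set.discard, List.filter_filter, List.filter_cons, hp, if_pos]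
      congr 1
      apply List.filter_congr
      intro x _
      by_cases hx : x = c <;> simp [hx, hp, Bool.and_comm]
    · simp only [Bool.not_eq_true] at hp
      rw [hp]
      simp only [Bool.false_eq_true, if_false, ih, PySem.Set.discard, List.filter_cons, hp,
        List.filter_filter]
      apply List.filter_congr
      intro x _
      by_cases hx : x = c <;> simp [hx, hp]

-- length bookkeeping: len(inp) - len(rest) is the count of the first char
theorem pv_filter_len_count (c : Char) (cs : List Char) :
    (pvDrop c cs).length + cs.count c = cs.length := by
  induction cs with
  | nil => simp [pvDrop]
  | cons x xs ih =>
    by_cases hx : x = c <;> simp [pvDrop, hx] at ih ⊢ <;> omega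

-- B's recursion computes the same runs-over-dedup value
theorem pvAltGo_eq (l : List Char) :
    pvAltGo l = (PySem.Set.ofList l).flatMap (fun c => List.replicate (l.count c) c) := by
  induction l using pvAltGo.induct with
  | case1 => simp [pvAltGo]
  | case2 c cs ih =>
    rw [pvAltGo, PySem.Set.ofList_cons, List.flatMap_cons]
    have hrest : PySem.Set.ofList (pvDrop c cs) = (PySem.Set.ofList cs).discard c := by
      rw [pvDrop, pv_ofList_filter]
      simp only [PySem.Set.discard]
      apply List.filter_congr
      intro x _
      by_cases hx : x = c <;> simp [hx]
    have hlen : (c :: cs).length - (pvDrop c cs).length = (c :: cs).count c := by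
      have h1 := pv_filter_len_count c cs
      simp only [List.count_cons_self, List.length_cons]
      omega
    rw [ih, hrest, hlen]
    congr 1
    rw [List.flatMap_def, List.flatMap_def]
    congr 1
    apply List.map_congr_left
    intro x hx
    have hxne : x ≠ c := by
      simp only [PySem.Set.discard, List.mem_filter] at hx
      simpa using hx.2
    congr 1
    rw [pvDrop, List.count_filter (by simp [hxne]), List.count_cons]
    simp [Ne.symm hxne]

-- ===== VERDICT (by name: the statement is the Claim_ definition above) =====
theorem put_together_spec : Claim_equal_put_together := by
  intro inp _
  unfold Spec_put_together put_together put_together_alt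
  by_cases he : inp = ""
  · subst he; rfl
  · rw [if_neg he, if_neg he, pvA_char, pvAltGo_eq]
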